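-- pv_equiv track=rewrite | github.com/fallkim/CodingTest | 프로그래머스/0/181857. 배열의 길이를 2의 거듭제곱으로 만들기/배열의 길이를 2의 거듭제곱으로 만들기.py | solution
-- ===== SOURCE A (Python) =====
-- def solution(arr):
--     if len(arr) & (len(arr)-1) ==0:
--         return arr
--     answer =1
--     while answer < len(arr):
--         answer *= 2
--     result = answer -len(arr)
--     arr.extend([0]*result)
--     return arr
-- ===== SOURCE B (Python) =====
-- def solution(arr):
--     n = len(arr)
--     if n == 0:
--         return arr
--     target = 1 << (n - 1).bit_length()
--     arr.extend([0] * (target - n))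
--     return arr
-- ===== Notes on version B (the rewrite author's own statement) =====
-- stated objective: simpler
-- what changed: Replaces A's power-of-two bit-trick guard plus doubling while-loop by a single closed-form target length 1 << (n-1).bit_length(), padding by target-n zeros (zero when n is already a power of two).
import Mathlib
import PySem

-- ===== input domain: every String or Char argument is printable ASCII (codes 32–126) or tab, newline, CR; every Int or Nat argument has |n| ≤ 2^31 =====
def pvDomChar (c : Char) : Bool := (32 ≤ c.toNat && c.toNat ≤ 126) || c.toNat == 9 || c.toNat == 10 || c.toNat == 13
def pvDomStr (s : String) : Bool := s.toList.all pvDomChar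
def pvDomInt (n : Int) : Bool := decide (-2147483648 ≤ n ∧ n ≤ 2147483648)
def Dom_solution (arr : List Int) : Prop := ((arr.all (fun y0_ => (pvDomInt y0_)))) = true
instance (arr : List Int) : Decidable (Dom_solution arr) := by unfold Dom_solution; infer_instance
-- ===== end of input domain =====

-- B replaces A's doubling while-loop by the closed-form bit-length target; objective: simpler.
-- The Python A (and B) mutate arr in place via extend; the equivalence proved here is about the return value.

-- ===== PORT A =====
-- A's while loop 'while answer < n: answer *= 2', as fuel recursion; fuel = n is enough
-- since the loop doubles from 1 and stops at the first power of two ≥ n (≤ log2(n)+1 steps).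
def growA : Nat → Nat → Nat → Nat
  | 0, _, a => a
  | f+1, n, a => if a < n then growA f n (a*2) else a

-- Nat subtraction: for n = 0 the guard is 0 &&& 0 = 0, the same branch Python takes (0 & -1 == 0).
def solution (arr : List Int) : List Int :=
  let n := arr.length
  if n &&& (n - 1) = 0 then arr
  else
    let answer := growA n n 1
    let result := answer - n
    arr ++ List.replicate result 0

-- ===== PORT B =====
-- (n-1).bit_length() is Nat.size (n-1); 1 << k is 1 <<< k.
def solution_alt (arr : List Int) : List Int :=
  let n := arr.length
  if n = 0 then arr
  else
    let target := 1 <<< Nat.size (n - 1)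
    arr ++ List.replicate (target - n) 0

-- ===== PRECONDITION & SPEC =====
def Spec_solution (arr : List Int) (out : List Int) : Prop := out = solution_alt arr
instance (arr : List Int) (out : List Int) : Decidable (Spec_solution arr out) := by unfold Spec_solution; infer_instance

-- ===== CLAIM (what is proved, stated in full; the proofs are below) =====
def Claim_equal_solution : Prop := ∀ (arr : List Int), Dom_solution arr → Spec_solution arr (solution arr)

-- ===== LEMMAS AND PROOFS =====

theorem land_even (m k : Nat) : (2*m) &&& (2*k+1) = 2*(m &&& k) := by
  have h := Nat.land_bit false m true k
  simpa [Nat.bit] using h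

theorem land_odd (m k : Nat) : (2*m+1) &&& (2*k) = 2*(m &&& k) := by
  have h := Nat.land_bit true m false k
  simpa [Nat.bit] using h

-- n & (n-1) == 0, n ≥ 1  →  n is a power of two
theorem land_pred_pow (n : Nat) (h1 : 1 ≤ n) (h : n &&& (n-1) = 0) : ∃ k, n = 2^k := by
  induction n using Nat.strong_induction_on with
  | _ n ih =>
    rcases Nat.even_or_odd n with he | ho
    · obtain ⟨m, hm⟩ := he
      have hm2 : n = 2*m := by omega
      have hm1 : 1 ≤ m := by omega
      rcases Nat.eq_or_lt_of_le hm1 with h1' | h1'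
      · exact ⟨1, by omega⟩
      · have hpred : n - 1 = 2*(m-1)+1 := by omega
        have : (2*m) &&& (2*(m-1)+1) = 2*(m &&& (m-1)) := land_even m (m-1)
        have hz : m &&& (m-1) = 0 := by
          rw [hpred, hm2, this] at h; omega
        obtain ⟨k, hk⟩ := ih m (by omega) hm1 hz
        exact ⟨k+1, by rw [hm2, hk]; ring⟩
    · obtain ⟨m, hm⟩ := ho
      rcases Nat.eq_zero_or_pos m with h0 | h0
      · exact ⟨0, by omega⟩
      · exfalso
        have hpred : n - 1 = 2*m := by omega
        have : (2*m+1) &&& (2*m) = 2*(m &&& m) := land_odd m m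
        rw [Nat.and_self m] at this
        rw [hpred, hm, this] at h
        omega

theorem size_pred_pow (k : Nat) : Nat.size (2^k - 1) = k := by
  rcases Nat.eq_zero_or_pos k with h0 | h0
  · subst h0; simp
  · have hle : Nat.size (2^k - 1) ≤ k := Nat.size_le.2 (by
      have : 1 ≤ 2^k := Nat.one_le_two_pow
      omega)
    have hge : k ≤ Nat.size (2^k - 1) := by
      by_contra hlt
      have hlt2 : Nat.size (2^k - 1) < k := by omega
      have h2 : Nat.size (2^k - 1) ≤ k - 1 := by omega
      have := Nat.size_le.1 h2
      have hmono : 2^(k-1) ≤ 2^k := Nat.pow_le_pow_right (by norm_num) (by omega)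
      have h1k : 1 ≤ 2^(k-1) := Nat.one_le_two_pow
      have hhalf : 2^(k-1) * 2 = 2^k := by
        rw [← Nat.pow_succ]; congr 1; omega
      omega
    omega

-- the loop computes the least power of two ≥ n, i.e. 2 ^ size (n-1), starting from 2^j
theorem growA_eq (n : Nat) (hn : 1 ≤ n) :
    ∀ fuel j, j ≤ Nat.size (n-1) → Nat.size (n-1) ≤ j + fuel →
      growA fuel n (2^j) = 2 ^ Nat.size (n-1) := by
  intro fuel
  induction fuel with
  | zero =>
    intro j hj hf
    have : j = Nat.size (n-1) := by omega
    simp [growA, this]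
  | succ f ih =>
    intro j hj hf
    by_cases hlt : 2^j < n
    · have hjs : j < Nat.size (n-1) := by
        by_contra hge
        have hge' : Nat.size (n-1) ≤ j := by omega
        have := Nat.size_le.1 hge'
        omega
      have : growA (f+1) n (2^j) = growA f n (2^j * 2) := by
        simp [growA, hlt]
      rw [this]
      have h2 : 2^j * 2 = 2^(j+1) := (Nat.pow_succ 2 j).symm
      rw [h2]
      exact ih (j+1) (by omega) (by omega)
    · have hlt' : n ≤ 2^j := Nat.le_of_not_lt hlt
      have hs : Nat.size (n-1) ≤ j := Nat.size_le.2 (by omega)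
      have hje : j = Nat.size (n-1) := by omega
      have heq : growA (f+1) n (2^j) = 2^j := by simp [growA, hlt]
      rw [heq, hje]

theorem size_pred_le (n : Nat) (hn : 1 ≤ n) : Nat.size (n-1) ≤ n := by
  have h := Nat.size_le (m := n-1) (n := n)
  exact h.2 (by have := Nat.lt_two_pow_self (n := n); omega)

-- ===== VERDICT (by name: the statement is the Claim_ definition above) =====
theorem solution_spec : Claim_equal_solution := by
  intro arr _
  unfold Spec_solution solution solution_alt
  set n := arr.length with hn
  by_cases h0 : n = 0
  · simp [h0]
  · have hn1 : 1 ≤ n := by omega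
    simp only [h0, if_false]
    by_cases hp : n &&& (n-1) = 0
    · -- power of two: pad is zero on B's side
      obtain ⟨k, hk⟩ := land_pred_pow n hn1 hp
      have hsz : Nat.size (n-1) = k := by rw [hk]; exact size_pred_pow k
      have : 1 <<< Nat.size (n-1) - n = 0 := by
        rw [Nat.one_shiftLeft, hsz, ← hk]; omega
      simp [hp, this]
    · -- loop branch: growA n n 1 = 2 ^ size (n-1) = B's target
      have hg : growA n n (2^0) = 2 ^ Nat.size (n-1) :=
        growA_eq n hn1 n 0 (Nat.zero_le _) (by have := size_pred_le n hn1; omega)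
      simp only [pow_zero] at hg
      simp [hp, hg, Nat.one_shiftLeft]
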